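-- pv_equiv track=rewrite | github.com/GANJINAVEEN14161416/Leetcode_DSA | Stack Permutations - GFG/stack-permutations.py | isStackPermutation
-- ===== SOURCE A (Python) =====
-- from typing import List
--
-- def isStackPermutation(N : int, A : List[int], B : List[int]) -> int:
--     # code here
--     i,j,stack=0,0,[]
--     for i in range(N):
--         stack.append(A[i])
--         while stack and stack[-1]==B[j]:
--             pop=stack.pop()
--             j+=1
--     if j==N:
--         return 1
--     return 0
-- ===== SOURCE B (Python) =====
-- from typing import List
--
-- def isStackPermutation(N: int, A: List[int], B: List[int]) -> int:
--     # f[t] == t  <=>  push t is still unmatched; otherwise f[t] points toward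
--     # the nearest unmatched push index below t (path-compressed union-find).
--     f = list(range(N))
--     j = 0
--     for i in range(N):
--         t = i  # the top of the (implicit) stack is the greatest unmatched index <= i
--         while t >= 0 and A[t] == B[j]:
--             f[t] = t - 1  # match push t with pop j
--             j += 1
--             # find the nearest unmatched index below t, compressing the path
--             r = t - 1
--             while r >= 0 and f[r] != r:
--                 r = f[r]
--             while t >= 0 and f[t] != t and f[t] != r:
--                 f[t], t = r, f[t]
--             t = r
--     return 1 if j == N else 0
-- ===== Notes on version B (the rewrite author's own statement) =====
-- stated objective: alternative
-- what changed: B keeps no stack at all: it maintains a path-compressed union-find of parent pointers over push indices ('nearest unmatched push at or below t') and matches each pop by chasing pointers, instead of A's append/pop list-stack simulation.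
-- outside the precondition, e.g. on isStackPermutation(2, [1, 2], [5]): A returns 0, B returns 0
import Mathlib
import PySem

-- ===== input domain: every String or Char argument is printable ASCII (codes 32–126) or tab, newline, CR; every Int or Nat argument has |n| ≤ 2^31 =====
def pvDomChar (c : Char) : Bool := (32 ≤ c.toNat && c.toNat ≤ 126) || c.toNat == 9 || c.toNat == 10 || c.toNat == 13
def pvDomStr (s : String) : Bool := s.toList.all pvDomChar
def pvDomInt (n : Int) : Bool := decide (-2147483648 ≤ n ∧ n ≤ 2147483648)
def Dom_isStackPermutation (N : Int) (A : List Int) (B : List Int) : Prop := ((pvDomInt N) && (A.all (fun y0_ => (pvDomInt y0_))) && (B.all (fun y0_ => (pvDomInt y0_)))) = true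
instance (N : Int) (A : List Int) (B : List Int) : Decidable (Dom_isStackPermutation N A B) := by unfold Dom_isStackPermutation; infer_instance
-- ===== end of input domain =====

-- B replaces A's explicit list-stack by a path-compressed union-find of parent pointers
-- over push indices ("nearest unmatched push at or below t"); same result proved on Pre_.


-- ===== PORT A =====
-- Stack is represented with the TOP AT THE HEAD (Python's stack[-1] = head, append = cons).
-- Inner `while stack and stack[-1]==B[j]`: pop while the top equals B[j], advancing j.
def popWhileA (B : List Int) (j : Int) (stack : List Int) : Int × List Int :=
  match stack with
  | [] => (j, [])
  | t :: rest =>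
      if PySem.List.pyGet? B j = some t then popWhileA B (j + 1) rest else (j, t :: rest)

-- `for i in range(N)`: push A[i], then run the pop-while loop; after the loop, j==N test.
def loopA (A B : List Int) (N i j : Int) (stack : List Int) : Int :=
  if h : i < N then
    let p := popWhileA B j ((PySem.List.pyGet? A i).getD 0 :: stack)
    loopA A B N (i + 1) p.1 p.2
  else if j = N then 1 else 0
termination_by (N - i).toNat
decreasing_by omega

def isStackPermutation (N : Int) (A : List Int) (B : List Int) : Int :=
  loopA A B N 0 0 []

-- ===== PORT B =====
-- The parent array f (Python: a list of length N, f[t]==t ⟺ push t unmatched) is modelled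
-- as a total function Int → Int updated pointwise; `pvUpd` is the array write f[t]=v.
def pvUpd (f : Int → Int) (t v : Int) : Int → Int := fun x => if x = t then v else f x

-- `r = t-1; while r >= 0 and f[r] != r: r = f[r]` (fuel only makes the loop total).
def findLoopB (f : Int → Int) : Nat → Int → Int
  | 0, r => r
  | fuel + 1, r => if 0 ≤ r ∧ f r ≠ r then findLoopB f fuel (f r) else r

-- `while t >= 0 and f[t] != t and f[t] != r: f[t], t = r, f[t]` (path compression).
def compressLoopB (r : Int) : Nat → (Int → Int) → Int → (Int → Int)
  | 0, f, _ => f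
  | fuel + 1, f, t =>
      if 0 ≤ t ∧ f t ≠ t ∧ f t ≠ r then compressLoopB r fuel (pvUpd f t r) (f t) else f

-- `while t >= 0 and A[t] == B[j]:` match push t with pop j, then walk to the next
-- unmatched index below, compressing the walked path.
def popLoopB (A B : List Int) (F : Nat) : Nat → (Int → Int) → Int → Int → (Int → Int) × Int
  | 0, f, j, _ => (f, j)
  | fuel + 1, f, j, t =>
      if 0 ≤ t ∧ (PySem.List.pyGet? A t).getD 0 = (PySem.List.pyGet? B j).getD 0 then
        let f1 := pvUpd f t (t - 1)
        let r := findLoopB f1 F (t - 1)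
        let f2 := compressLoopB r F f1 t
        popLoopB A B F fuel f2 (j + 1) r
      else (f, j)

-- `for i in range(N)`: the implicit stack top after pushing i is i itself.
def outerB (A B : List Int) (N : Int) (F : Nat) (i j : Int) (f : Int → Int) : Int :=
  if h : i < N then
    let p := popLoopB A B F F f j i
    outerB A B N F (i + 1) p.2 p.1
  else if j = N then 1 else 0
termination_by (N - i).toNat
decreasing_by omega

def isStackPermutation_alt (N : Int) (A : List Int) (B : List Int) : Int :=
  outerB A B N (N.toNat + 2) 0 0 (fun x => x)

-- ===== PRECONDITION & SPEC =====
-- Pre_ excludes inputs with N > len(A) or N > len(B), on which the Python A raises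
-- IndexError (always when N > len(A); when N > len(B) it raises whenever the pop index
-- reaches len(B), and on the inputs where it still returns, both programs agree on 0).
def Pre_isStackPermutation (N : Int) (A : List Int) (B : List Int) : Prop :=
  N ≤ (A.length : Int) ∧ N ≤ (B.length : Int)
instance (N : Int) (A : List Int) (B : List Int) : Decidable (Pre_isStackPermutation N A B) := by
  unfold Pre_isStackPermutation; infer_instance

def pvWitness_isStackPermutation : Int × List Int × List Int := (3, [1, 2, 3], [2, 1, 3])

def Spec_isStackPermutation (N : Int) (A : List Int) (B : List Int) (out : Int) : Prop := out = isStackPermutation_alt N A B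
instance (N : Int) (A : List Int) (B : List Int) (out : Int) : Decidable (Spec_isStackPermutation N A B out) := by unfold Spec_isStackPermutation; infer_instance

-- ===== CLAIM (what is proved, stated in full; the proofs are below) =====
def Claim_equal_isStackPermutation : Prop := ∀ (N : Int) (A : List Int) (B : List Int), Dom_isStackPermutation N A B → Pre_isStackPermutation N A B → Spec_isStackPermutation N A B (isStackPermutation N A B)

-- ===== LEMMAS AND PROOFS =====

theorem pvUpd_self (f : Int → Int) (t v : Int) : pvUpd f t v t = v := by simp [pvUpd]
theorem pvUpd_ne (f : Int → Int) (t v x : Int) (h : x ≠ t) : pvUpd f t v x = f x := by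
  simp [pvUpd, h]

-- Value pushed for index u (A[u] as the A-port fetches it).
def stVal (A : List Int) (u : Int) : Int := (PySem.List.pyGet? A u).getD 0

-- `FindsTo f t r`: the pointer chase from t under f stops at r.
inductive FindsTo (f : Int → Int) : Int → Int → Prop
  | stop (t : Int) : (t < 0 ∨ f t = t) → FindsTo f t t
  | step (t r : Int) : 0 ≤ t → f t ≠ t → FindsTo f (f t) r → FindsTo f t r

-- `down st t`: the first element of st that is ≤ t (st is strictly descending), else -1.
def down : List Int → Int → Int
  | [], _ => -1
  | u :: us, t => if u ≤ t then u else down us t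

-- Ghost stack: st lists the unmatched push indices, top first, strictly descending, in [0, ip).
def StOK (st : List Int) (ip : Int) : Prop :=
  List.Pairwise (fun a b => b < a) st ∧ ∀ u ∈ st, 0 ≤ u ∧ u < ip

-- Invariant tying B's parent function f to the ghost stack st.
def StInv (f : Int → Int) (st : List Int) (ip : Int) : Prop :=
  (∀ x, f x ≤ x) ∧
  (∀ x, x ∈ st → f x = x) ∧
  (∀ x, ip ≤ x → f x = x) ∧
  (∀ t, -1 ≤ t → t < ip → FindsTo f t (down st t))

theorem findsTo_le (f : Int → Int) (hm : ∀ x, f x ≤ x) {t r : Int} (h : FindsTo f t r) :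
    r ≤ t := by
  induction h with
  | stop => exact le_refl _
  | step t r ht hne _ ih => exact le_trans ih (hm t)

theorem findsTo_terminal (f : Int → Int) {t r : Int} (h : FindsTo f t r) :
    r < 0 ∨ f r = r := by
  induction h with
  | stop _ h => exact h
  | step _ _ _ _ _ ih => exact ih

theorem findsTo_det (f : Int → Int) {t r s : Int} (h1 : FindsTo f t r) (h2 : FindsTo f t s) :
    r = s := by
  induction h1 generalizing s with
  | stop t ht =>
      cases h2 with
      | stop => rfl
      | step _ _ h0 hne _ =>
          rcases ht with h | h
          · omega
          · exact absurd h hne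
  | step t r ht hne _ ih =>
      cases h2 with
      | stop _ h =>
          rcases h with h | h
          · omega
          · exact absurd h hne
      | step _ _ _ _ h2' => exact ih h2'

theorem findLoopB_eq (f : Int → Int) (hm : ∀ x, f x ≤ x) {t r : Int} (h : FindsTo f t r) :
    ∀ fuel : Nat, (t - r).toNat < fuel → findLoopB f fuel t = r := by
  induction h with
  | stop t ht =>
      intro fuel hf
      match fuel with
      | fuel + 1 =>
          simp only [findLoopB]
          rw [if_neg]
          rintro ⟨h0, hne⟩
          rcases ht with h | h
          · omega
          · exact hne h
  | step t r h0 hne hrec ih =>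
      intro fuel hf
      have hlt : f t < t := lt_of_le_of_ne (hm t) hne
      have hr : r ≤ f t := findsTo_le f hm hrec
      match fuel with
      | fuel + 1 =>
          simp only [findLoopB]
          rw [if_pos ⟨h0, hne⟩]
          exact ih fuel (by omega)

-- Writing a node's own root into it preserves every chase (forward direction).
theorem findsTo_upd_root_fwd (f : Int → Int) {x r : Int} (hx : FindsTo f x r)
    {y s : Int} (h : FindsTo f y s) : FindsTo (pvUpd f x r) y s := by
  induction h with
  | stop y hy =>
      rcases hy with hy | hy
      · exact FindsTo.stop _ (Or.inl hy)
      · by_cases hyx : y = x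
        · subst hyx
          have hrx : r = y := findsTo_det f hx (FindsTo.stop _ (Or.inr hy))
          refine FindsTo.stop _ (Or.inr ?_)
          rw [pvUpd_self, hrx]
        · exact FindsTo.stop _ (Or.inr (by rw [pvUpd_ne _ _ _ _ hyx]; exact hy))
  | step y s h0 hne hrec ih =>
      by_cases hyx : y = x
      · subst hyx
        have hsr : s = r := by
          cases hx with
          | stop _ h =>
              rcases h with h | h
              · omega
              · exact absurd h hne
          | step _ _ _ _ hx' => exact findsTo_det f hrec hx'
        have hterm := findsTo_terminal f hx
        have hrx : r ≠ y := by
          rcases hterm with h | h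
          · omega
          · intro hh; rw [hh] at h; exact hne h
        rw [hsr]
        refine FindsTo.step _ _ h0 (by rw [pvUpd_self]; exact hrx) ?_
        rw [pvUpd_self]
        rcases hterm with h | h
        · exact FindsTo.stop _ (Or.inl h)
        · refine FindsTo.stop _ (Or.inr ?_)
          rw [pvUpd_ne _ _ _ _ hrx]
          exact h
      · refine FindsTo.step _ _ h0 (by rw [pvUpd_ne _ _ _ _ hyx]; exact hne) ?_
        rw [pvUpd_ne _ _ _ _ hyx]
        exact ih

-- Writing a node's own root into it preserves every chase (backward direction).
theorem findsTo_upd_root_bwd (f : Int → Int) {x r : Int} (hx : FindsTo f x r)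
    {y s : Int} (h : FindsTo (pvUpd f x r) y s) : FindsTo f y s := by
  induction h with
  | stop y hy =>
      rcases hy with hy | hy
      · exact FindsTo.stop _ (Or.inl hy)
      · by_cases hyx : y = x
        · subst hyx
          have : r = y := by rw [pvUpd_self] at hy; exact hy
          subst this
          exact hx
        · exact FindsTo.stop _ (Or.inr (by rw [pvUpd_ne _ _ _ _ hyx] at hy; exact hy))
  | step y s h0 hne hrec ih =>
      by_cases hyx : y = x
      · subst hyx
        rw [pvUpd_self] at ih
        have hrr : FindsTo f r r := by
          rcases findsTo_terminal f hx with h | h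
          · exact FindsTo.stop _ (Or.inl h)
          · exact FindsTo.stop _ (Or.inr h)
        have : s = r := findsTo_det f ih hrr
        subst this
        exact hx
      · rw [pvUpd_ne _ _ _ _ hyx] at hne ih
        exact FindsTo.step _ _ h0 hne ih

-- Writing t-1 into an unmatched node u: chases not ending at u are unchanged.
theorem findsTo_upd_fix_notvia (f : Int → Int) {u : Int} (hu : f u = u) {y s : Int}
    (h : FindsTo f y s) : s ≠ u → FindsTo (pvUpd f u (u - 1)) y s := by
  induction h with
  | stop y hy =>
      intro hs
      rcases hy with hy | hy
      · exact FindsTo.stop _ (Or.inl hy)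
      · have hyu : y ≠ u := hs
        refine FindsTo.stop _ (Or.inr ?_)
        rw [pvUpd_ne _ _ _ _ hyu]
        exact hy
  | step y s h0 hne hrec ih =>
      intro hs
      have hyu : y ≠ u := fun hh => hne (by rw [hh]; exact hu)
      refine FindsTo.step _ _ h0 (by rw [pvUpd_ne _ _ _ _ hyu]; exact hne) ?_
      rw [pvUpd_ne _ _ _ _ hyu]
      exact ih hs

-- Writing u-1 into an unmatched node u: chases that ended at u continue to u-1's root.
theorem findsTo_upd_fix_via (f : Int → Int) {u y z : Int} (h : FindsTo f y u) :
    f u = u → 0 ≤ u → FindsTo (pvUpd f u (u - 1)) (u - 1) z →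
    FindsTo (pvUpd f u (u - 1)) y z := by
  induction h with
  | stop t _ =>
      intro _ h0 hz
      refine FindsTo.step _ _ h0 (by rw [pvUpd_self]; omega) ?_
      rw [pvUpd_self]
      exact hz
  | step y u h0 hne hrec ih =>
      intro hu h0u hz
      have hyu : y ≠ u := fun hh => hne (by rw [hh]; exact hu)
      refine FindsTo.step _ _ h0 (by rw [pvUpd_ne _ _ _ _ hyu]; exact hne) ?_
      rw [pvUpd_ne _ _ _ _ hyu]
      exact ih hu h0u hz

theorem down_le : ∀ (st : List Int) (t : Int), -1 ≤ t → down st t ≤ t := by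
  intro st
  induction st with
  | nil => intro t ht; simpa [down] using ht
  | cons u us ih =>
      intro t ht
      by_cases h : u ≤ t
      · simp [down, h]
      · simp only [down, if_neg h]; exact ih t ht

theorem down_ge : ∀ (st : List Int) (t : Int), (∀ u ∈ st, 0 ≤ u) → -1 ≤ down st t := by
  intro st
  induction st with
  | nil => intro t _; simp [down]
  | cons u us ih =>
      intro t hb
      by_cases h : u ≤ t
      · simp only [down, if_pos h]
        have := hb u (by simp); omega
      · simp only [down, if_neg h]
        exact ih t (fun v hv => hb v (by simp [hv]))

theorem down_high : ∀ (us : List Int) (u t : Int), (∀ e ∈ us, e < u) → u ≤ t →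
    down us t = down us (u - 1) := by
  intro us
  induction us with
  | nil => intro u t _ _; rfl
  | cons e es ih =>
      intro u t hb hu
      have he : e < u := hb e (by simp)
      simp only [down, if_pos (by omega : e ≤ t), if_pos (by omega : e ≤ u - 1)]

-- Path compression preserves chases, monotonicity and fixed points.
theorem compress_pres (r : Int) :
    ∀ (fuel : Nat) (f : Int → Int) (t : Int), (∀ x, f x ≤ x) → FindsTo f t r →
      (∀ x, compressLoopB r fuel f t x ≤ x) ∧
      (∀ y s, FindsTo f y s ↔ FindsTo (compressLoopB r fuel f t) y s) ∧
      (∀ x, f x = x → compressLoopB r fuel f t x = x) := by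
  intro fuel
  induction fuel with
  | zero => intro f t hm _; exact ⟨hm, fun _ _ => Iff.rfl, fun _ h => h⟩
  | succ fuel ih =>
      intro f t hm hroot
      by_cases hg : 0 ≤ t ∧ f t ≠ t ∧ f t ≠ r
      · have hstep : FindsTo f (f t) r := by
          cases hroot with
          | stop _ h =>
              exfalso
              rcases h with h | h
              · exact absurd h (by omega)
              · exact hg.2.1 h
          | step _ _ _ _ h => exact h
        have hrle : r ≤ f t := findsTo_le f hm hstep
        have hm' : ∀ x, pvUpd f t r x ≤ x := by
          intro x
          by_cases hxt : x = t
          · rw [hxt, pvUpd_self]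
            exact le_trans hrle (hm t)
          · rw [pvUpd_ne _ _ _ _ hxt]
            exact hm x
        have hpres : ∀ y s, FindsTo f y s ↔ FindsTo (pvUpd f t r) y s :=
          fun y s => ⟨findsTo_upd_root_fwd f hroot, findsTo_upd_root_bwd f hroot⟩
        have hroot' : FindsTo (pvUpd f t r) (f t) r := (hpres _ _).mp hstep
        have := ih (pvUpd f t r) (f t) hm' hroot'
        have hcomp : compressLoopB r (fuel + 1) f t = compressLoopB r fuel (pvUpd f t r) (f t) := by
          simp only [compressLoopB]
          rw [if_pos hg]
        rw [hcomp]
        refine ⟨this.1, fun y s => (hpres y s).trans (this.2.1 y s), ?_⟩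
        intro x hx
        have hxt : x ≠ t := fun hh => hg.2.1 (by rw [hh] at hx; exact hx)
        exact this.2.2 x (by rw [pvUpd_ne _ _ _ _ hxt]; exact hx)
      · have hcomp : compressLoopB r (fuel + 1) f t = f := by
          simp only [compressLoopB]
          rw [if_neg hg]
        rw [hcomp]
        exact ⟨hm, fun _ _ => Iff.rfl, fun _ h => h⟩

-- One pop step: the head u of the ghost stack is matched; the port's find returns the
-- new top and the compressed parent function still satisfies the invariant for the tail.
theorem popstep (N ip u : Int) (us : List Int) (f : Int → Int)
    (hst : StOK (u :: us) ip) (hinv : StInv f (u :: us) ip) (hip : ip ≤ N) :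
    findLoopB (pvUpd f u (u - 1)) (N.toNat + 2) (u - 1) = down us (u - 1) ∧
    StInv (compressLoopB (down us (u - 1)) (N.toNat + 2) (pvUpd f u (u - 1)) u) us ip := by
  obtain ⟨hpw, hbd⟩ := hst
  obtain ⟨hm, hmem, hhi, hch⟩ := hinv
  have hu0 : 0 ≤ u := (hbd u (by simp)).1
  have huip : u < ip := (hbd u (by simp)).2
  have hfu : f u = u := hmem u (by simp)
  have hustail : ∀ e ∈ us, e < u := by
    intro e he
    exact (List.pairwise_cons.mp hpw).1 e he
  have hbdtail : ∀ e ∈ us, 0 ≤ e ∧ e < ip := fun e he => hbd e (by simp [he])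
  set f1 := pvUpd f u (u - 1) with hf1
  have hm1 : ∀ x, f1 x ≤ x := by
    intro x
    by_cases hxu : x = u
    · subst hxu; rw [hf1, pvUpd_self]; omega
    · simp only [hf1, pvUpd, if_neg hxu]; exact hm x
  -- chases under f1 point at `down us ·`
  have hch1 : ∀ t, -1 ≤ t → t < ip → FindsTo f1 t (down us t) := by
    have hkey : FindsTo f1 (u - 1) (down us (u - 1)) := by
      have h1 : FindsTo f (u - 1) (down (u :: us) (u - 1)) := hch (u - 1) (by omega) (by omega)
      have h2 : down (u :: us) (u - 1) = down us (u - 1) := by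
        simp only [down]
        rw [if_neg (by omega : ¬ u ≤ u - 1)]
      rw [h2] at h1
      have hne : down us (u - 1) ≠ u := by
        have := down_le us (u - 1) (by omega)
        omega
      exact findsTo_upd_fix_notvia f hfu h1 hne
    intro t ht htip
    by_cases hut : u ≤ t
    · have h1 : FindsTo f t (down (u :: us) t) := hch t ht htip
      have h2 : down (u :: us) t = u := by simp [down, hut]
      rw [h2] at h1
      have h3 : FindsTo f1 t (down us (u - 1)) :=
        findsTo_upd_fix_via f h1 hfu hu0 hkey
      rwa [down_high us u t hustail hut]
    · have h1 : FindsTo f t (down (u :: us) t) := hch t ht htip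
      have h2 : down (u :: us) t = down us t := by simp [down, hut]
      rw [h2] at h1
      have hne : down us t ≠ u := by
        have := down_le us t ht
        omega
      exact findsTo_upd_fix_notvia f hfu h1 hne
  have hgd : -1 ≤ down us (u - 1) := down_ge us (u - 1) (fun e he => (hbdtail e he).1)
  have hdle : down us (u - 1) ≤ u - 1 := down_le us (u - 1) (by omega)
  -- find computes it
  have hfind : findLoopB f1 (N.toNat + 2) (u - 1) = down us (u - 1) := by
    apply findLoopB_eq f1 hm1 (hch1 (u - 1) (by omega) (by omega))
    omega
  refine ⟨hfind, ?_⟩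
  -- compression from u, whose root is down us (u-1)
  have hrootu : FindsTo f1 u (down us (u - 1)) := by
    have hf1u : f1 u = u - 1 := by rw [hf1, pvUpd_self]
    refine FindsTo.step _ _ hu0 (by rw [hf1u]; omega) ?_
    rw [hf1u]
    exact hch1 (u - 1) (by omega) (by omega)
  obtain ⟨hm2, hpres2, hfix2⟩ := compress_pres (down us (u - 1)) (N.toNat + 2) f1 u hm1 hrootu
  refine ⟨hm2, ?_, ?_, ?_⟩
  · intro x hx
    have hxu : x ≠ u := fun hh => by
      have := hustail x hx; omega
    exact hfix2 x (by simp [hf1, pvUpd, hxu]; exact hmem x (by simp [hx]))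
  · intro x hxip
    have hxu : x ≠ u := by omega
    exact hfix2 x (by simp [hf1, pvUpd, hxu]; exact hhi x hxip)
  · intro t ht htip
    exact (hpres2 t (down us t)).mp (hch1 t ht htip)

-- The cascade: one run of A's pop-while loop against one run of B's pop loop.
theorem cascade (A B : List Int) (N ip : Int) (hNB : N ≤ (B.length : Int)) (hip : ip ≤ N) :
    ∀ (st : List Int) (f : Int → Int) (j : Int) (fuel : Nat),
      StOK st ip → StInv f st ip → 0 ≤ j → j + (st.length : Int) ≤ N → st.length < fuel →
      (popLoopB A B (N.toNat + 2) fuel f j (st.headD (-1))).2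
          = (popWhileA B j (st.map (stVal A))).1 ∧
      ∃ st2 : List Int,
        (popWhileA B j (st.map (stVal A))).2 = st2.map (stVal A) ∧
        StOK st2 ip ∧
        StInv (popLoopB A B (N.toNat + 2) fuel f j (st.headD (-1))).1 st2 ip ∧
        (popWhileA B j (st.map (stVal A))).1 + (st2.length : Int)
          = j + (st.length : Int) := by
  intro st
  induction st with
  | nil =>
      intro f j fuel hst hinv hj hlen hfuel
      match fuel with
      | fuel + 1 =>
          refine ⟨by simp [popLoopB, popWhileA], [], by simp [popWhileA], hst, ?_, by simp [popWhileA]⟩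
          simpa [popLoopB] using hinv
  | cons u us ih =>
      intro f j fuel hst hinv hj hlen hfuel
      match fuel with
      | fuel + 1 =>
          have hu0 : 0 ≤ u := (hst.2 u (by simp)).1
          have hjB : j < (B.length : Int) := by
            simp only [List.length_cons] at hlen
            push_cast at hlen ⊢
            omega
          obtain ⟨v, hv⟩ : ∃ v, PySem.List.pyGet? B j = some v :=
            ⟨_, PySem.List.pyGet?_eq_some_getElem B hj (by exact_mod_cast hjB)⟩
          have hgd : (PySem.List.pyGet? B j).getD 0 = v := by rw [hv]; rfl
          by_cases hmatch : stVal A u = v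
          · -- both pop
            have hgA : (0 ≤ u ∧ (PySem.List.pyGet? A u).getD 0 = (PySem.List.pyGet? B j).getD 0) := by
              refine ⟨hu0, ?_⟩
              rw [hgd]; exact hmatch
            have hgW : PySem.List.pyGet? B j = some (stVal A u) := by rw [hv, hmatch]
            obtain ⟨hfind, hinv2⟩ := popstep N ip u us f hst hinv hip
            have hheads : us.headD (-1) = down us (u - 1) := by
              cases us with
              | nil => simp [down]
              | cons w ws =>
                  have hw : w < u := (List.pairwise_cons.mp hst.1).1 w (by simp)
                  simp [down, (by omega : w ≤ u - 1)]
            have hst2 : StOK us ip :=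
              ⟨(List.pairwise_cons.mp hst.1).2, fun e he => hst.2 e (by simp [he])⟩
            have hres := ih (compressLoopB (down us (u - 1)) (N.toNat + 2) (pvUpd f u (u - 1)) u)
              (j + 1) fuel hst2 hinv2 (by omega)
              (by simp only [List.length_cons] at hlen; push_cast at hlen ⊢; omega)
              (by simp at hfuel; omega)
            rw [hheads] at hres
            simp only [List.headD_cons, List.map_cons]
            rw [popLoopB]
            rw [if_pos hgA]
            simp only [hfind]
            rw [popWhileA, if_pos hgW]
            obtain ⟨h1, st2, h2, h3, h4, h5⟩ := hres
            refine ⟨h1, st2, h2, h3, h4, ?_⟩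
            simp only [List.length_cons] at *
            push_cast at h5 ⊢
            omega
          · -- neither pops
            have hgA : ¬ (0 ≤ u ∧ (PySem.List.pyGet? A u).getD 0 = (PySem.List.pyGet? B j).getD 0) := by
              rintro ⟨_, hh⟩
              rw [hgd] at hh
              exact hmatch hh
            have hgW : ¬ PySem.List.pyGet? B j = some (stVal A u) := by
              rw [hv]
              intro hh
              exact hmatch (Option.some.inj hh).symm
            simp only [List.headD_cons, List.map_cons]
            rw [popLoopB, if_neg hgA, popWhileA, if_neg hgW]
            exact ⟨rfl, u :: us, by simp, hst, hinv, by simp⟩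

-- The pop index never decreases along A's inner loop.
theorem popWhileA_le (B : List Int) (j : Int) (stack : List Int) :
    j ≤ (popWhileA B j stack).1 := by
  induction stack generalizing j with
  | nil => simp [popWhileA]
  | cons t rest ih =>
      simp only [popWhileA]
      split
      · exact le_trans (by omega) (ih (j + 1))
      · simp

-- Outer loops in lockstep.
theorem outer_sim (A B : List Int) (N : Int) (hNB : N ≤ (B.length : Int)) :
    ∀ (k : Nat) (i j : Int) (st : List Int) (f : Int → Int),
      (N - i).toNat = k → 0 ≤ i → i ≤ N → StOK st i → StInv f st i → 0 ≤ j →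
      j + (st.length : Int) = i →
      loopA A B N i j (st.map (stVal A)) = outerB A B N (N.toNat + 2) i j f := by
  intro k
  induction k with
  | zero =>
      intro i j st f hk h0 hiN hst hinv hj hlen
      have : i = N := by omega
      rw [loopA, dif_neg (by omega), outerB, dif_neg (by omega)]
  | succ k ihk =>
      intro i j st f hk h0 hiN hst hinv hj hlen
      have hiltN : i < N := by omega
      -- push: ghost stack becomes i :: st
      have hst' : StOK (i :: st) (i + 1) := by
        refine ⟨List.pairwise_cons.mpr ⟨fun e he => (hst.2 e he).2, hst.1⟩, ?_⟩
        intro e he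
        rcases List.mem_cons.mp he with he | he
        · omega
        · have := hst.2 e he; omega
      have hinv' : StInv f (i :: st) (i + 1) := by
        obtain ⟨hm, hmem, hhi, hch⟩ := hinv
        refine ⟨hm, ?_, fun x hx => hhi x (by omega), ?_⟩
        · intro x hx
          rcases List.mem_cons.mp hx with hx | hx
          · exact hhi x (hx ▸ le_refl _)
          · exact hmem x hx
        · intro t ht htip
          by_cases hti : t < i
          · have h1 := hch t ht hti
            have h2 : down (i :: st) t = down st t := by
              simp only [down]
              rw [if_neg (by omega : ¬ i ≤ t)]
            rw [h2]; exact h1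
          · have hti' : t = i := by omega
            have h2 : down (i :: st) t = t := by
              simp only [down]
              rw [hti', if_pos (le_refl i)]
            rw [h2, hti']
            exact FindsTo.stop _ (Or.inr (hhi i (le_refl _)))
      have hcas := cascade A B N (i + 1) hNB (by omega) (i :: st) f j (N.toNat + 2)
        hst' hinv' hj
        (by simp only [List.length_cons]; push_cast; omega)
        (by
          simp only [List.length_cons]
          have hs : (st.length : Int) = i - j := by omega
          omega)
      obtain ⟨h1, st2, h2, hst2, hinv2, h5⟩ := hcas
      simp only [List.headD_cons] at h1 hinv2
      rw [loopA, dif_pos hiltN, outerB, dif_pos hiltN]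
      show loopA A B N (i + 1)
          (popWhileA B j ((PySem.List.pyGet? A i).getD 0 :: st.map (stVal A))).1
          (popWhileA B j ((PySem.List.pyGet? A i).getD 0 :: st.map (stVal A))).2
        = outerB A B N (N.toNat + 2) (i + 1)
          (popLoopB A B (N.toNat + 2) (N.toNat + 2) f j i).2
          (popLoopB A B (N.toNat + 2) (N.toNat + 2) f j i).1
      have hmap : (PySem.List.pyGet? A i).getD 0 :: st.map (stVal A)
          = (i :: st).map (stVal A) := rfl
      rw [hmap, h2, h1]
      apply ihk (i + 1) _ st2 _ (by omega) (by omega) (by omega) hst2 hinv2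
      · exact le_trans hj (popWhileA_le B j _)
      · simp only [List.length_cons] at h5
        push_cast at h5 ⊢
        omega

-- ===== VERDICT (by name: the statement is the Claim_ definition above) =====
theorem isStackPermutation_spec : Claim_equal_isStackPermutation := by
  intro N A B _ hpre
  obtain ⟨hA, hB⟩ := hpre
  show isStackPermutation N A B = isStackPermutation_alt N A B
  unfold isStackPermutation isStackPermutation_alt
  by_cases h0 : 0 ≤ N
  · have hinv0 : StInv (fun x => x) [] 0 := by
      refine ⟨fun x => le_refl x, by simp, fun _ _ => rfl, ?_⟩
      intro t ht htip
      have : t = -1 := by omega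
      subst this
      exact FindsTo.stop _ (Or.inl (by omega))
    have := outer_sim A B N hB (N - 0).toNat 0 0 [] (fun x => x) rfl le_rfl h0
      ⟨List.Pairwise.nil, by simp⟩ hinv0 le_rfl (by simp)
    simpa using this
  · rw [loopA, dif_neg (by omega), if_neg (by omega),
      outerB, dif_neg (by omega), if_neg (by omega)]
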